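-- pv_equiv track=rewrite | github.com/mindroom-ai/mindroom | .github/scripts/generate_skill_references.py | _source_paragraph_lines
-- ===== SOURCE A (Python) =====
-- def _strip_frontmatter(text: str) -> str:
--     if not text.startswith("---\n"):
--         return text
--
--     _, separator, rest = text[4:].partition("\n---\n")
--     return rest if separator else text
--
-- def _source_paragraph_lines(source_text: str) -> list[list[str]]:
--     paragraphs: list[list[str]] = []
--     current: list[str] = []
--     in_code = False
--
--     for line in _strip_frontmatter(source_text).splitlines():
--         stripped = line.strip()
--         if stripped.startswith("```"):
--             in_code = not in_code
--
--         starts_block = (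
--             in_code
--             or not stripped
--             or line.startswith((" ", "\t"))
--             or stripped.startswith(("#", "-", "*", "|", ">", "```", "===", "!!!"))
--             or stripped[0].isdigit()
--         )
--         if starts_block:
--             if current:
--                 paragraphs.append(current)
--                 current = []
--             continue
--
--         current.append(stripped)
--
--     if current:
--         paragraphs.append(current)
--
--     return paragraphs
-- ===== SOURCE B (Python) =====
-- def _strip_frontmatter(text: str) -> str:
--     if not text.startswith("---\n"):
--         return text
--     _, separator, rest = text[4:].partition("\n---\n")
--     return rest if separator else text
--
--
-- def _source_paragraph_lines(source_text: str) -> list[list[str]]: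
--     # Phase 1: classify every line as block-start or not, threading the
--     # code-fence toggle; Phase 2: slice out maximal runs of non-block lines.
--     marks: list[tuple[bool, str]] = []
--     in_code = False
--     for line in _strip_frontmatter(source_text).splitlines():
--         stripped = line.strip()
--         if stripped.startswith("```"):
--             in_code = not in_code
--         blk = (
--             in_code
--             or not stripped
--             or line.startswith((" ", "\t"))
--             or stripped.startswith(("#", "-", "*", "|", ">", "```", "===", "!!!"))
--             or stripped[0].isdigit()
--         )
--         marks.append((blk, stripped))
--
--     paragraphs: list[list[str]] = []
--     i, n = 0, len(marks)
--     while i < n: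
--         if marks[i][0]:
--             i += 1
--             continue
--         j = i
--         while j < n and not marks[j][0]:
--             j += 1
--         paragraphs.append([s for _, s in marks[i:j]])
--         i = j
--     return paragraphs
-- ===== Notes on version B (the rewrite author's own statement) =====
-- stated objective: alternative
-- what changed: A's single state machine carrying (paragraphs, current, in_code) is replaced by a two-phase pipeline: first classify every line into a (starts_block, stripped) mark, then extract maximal runs of non-block marks by index scanning and slicing.
import Mathlib
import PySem

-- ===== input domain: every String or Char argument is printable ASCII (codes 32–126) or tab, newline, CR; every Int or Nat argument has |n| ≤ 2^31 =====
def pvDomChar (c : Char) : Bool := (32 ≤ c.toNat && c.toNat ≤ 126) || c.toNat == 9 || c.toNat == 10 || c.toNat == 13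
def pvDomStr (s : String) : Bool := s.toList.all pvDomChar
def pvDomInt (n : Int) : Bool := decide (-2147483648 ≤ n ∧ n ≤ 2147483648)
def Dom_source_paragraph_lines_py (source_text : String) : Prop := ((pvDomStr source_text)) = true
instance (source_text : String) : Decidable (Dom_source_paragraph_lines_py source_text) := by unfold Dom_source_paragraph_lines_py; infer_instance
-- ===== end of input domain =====

-- B replaces A's one-pass accumulator state machine by a classify-then-group pipeline (alternative decomposition, same cost).

-- shared helper: _strip_frontmatter (identical code in both Pythons)
-- partition("\n---\n") ported by hand via Str.find: sep nonempty iff find ≠ -1, rest = t4[f+5:] (exact)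
def pvStripFrontmatter (text : String) : String :=
  if PySem.Str.startswith text "---\n" then
    let t4 := PySem.Str.slice text (some 4) none
    let f := PySem.Str.find t4 "\n---\n"
    if f = -1 then text else PySem.Str.slice t4 (some (f + 5)) none
  else text

-- shared helper: one line's classification (the identical expression appears in both Pythons):
-- returns (new in_code, starts_block, stripped)
def pvClassifyLine (in_code : Bool) (line : String) : Bool × Bool × String :=
  let stripped := PySem.Str.strip line
  let ic := if PySem.Str.startswith stripped "```" then !in_code else in_code
  let blk :=
    ic || stripped.toList.isEmpty
      || PySem.Str.startswith line " " || PySem.Str.startswith line "\t"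
      || PySem.Str.startswith stripped "#" || PySem.Str.startswith stripped "-"
      || PySem.Str.startswith stripped "*" || PySem.Str.startswith stripped "|"
      || PySem.Str.startswith stripped ">" || PySem.Str.startswith stripped "```"
      || PySem.Str.startswith stripped "===" || PySem.Str.startswith stripped "!!!"
      || (match stripped.toList with
          | c :: _ => PySem.Chars.isdigit c
          | [] => false)   -- stripped[0].isdigit(); Python reaches it only when stripped ≠ ""
  (ic, blk, stripped)

-- ===== PORT A =====
def source_paragraph_lines_py (source_text : String) : List (List String) :=
  let st :=
    (PySem.Str.splitlines (pvStripFrontmatter source_text)).foldl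
      (fun (st : List (List String) × List String × Bool) line =>
        let (paragraphs, current, in_code) := st
        let (ic, blk, stripped) := pvClassifyLine in_code line
        if blk then
          (if current.isEmpty then paragraphs else paragraphs ++ [current], [], ic)
        else
          (paragraphs, current ++ [stripped], ic))
      ([], [], false)
  if st.2.1.isEmpty then st.1 else st.1 ++ [st.2.1]

-- ===== PORT B =====
-- phase 1: the classification loop building `marks`
def pvMarks (source_text : String) : List (Bool × String) :=
  ((PySem.Str.splitlines (pvStripFrontmatter source_text)).foldl
    (fun (st : List (Bool × String) × Bool) line =>
      let (ic, blk, stripped) := pvClassifyLine st.2 line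
      (st.1 ++ [(blk, stripped)], ic))
    ([], false)).1

-- phase 2: the index-scanning while loop; the inner scan to the next block mark
-- is takeWhile/dropWhile of the non-block predicate, the slice marks[i:j] its result
def pvGroups : List (Bool × String) → List (List String)
  | [] => []
  | (true, _) :: r => pvGroups r
  | (false, s) :: r =>
      (s :: (r.takeWhile (fun m => !m.1)).map Prod.snd)
        :: pvGroups (r.dropWhile (fun m => !m.1))
  termination_by l => l.length
  decreasing_by
    · simp
    · simpa using Nat.lt_succ_of_le (List.length_dropWhile_le _ _)

def source_paragraph_lines_py_alt (source_text : String) : List (List String) :=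
  pvGroups (pvMarks source_text)

-- ===== PRECONDITION & SPEC =====
def Spec_source_paragraph_lines_py (source_text : String) (out : List (List String)) : Prop := out = source_paragraph_lines_py_alt source_text
instance (source_text : String) (out : List (List String)) : Decidable (Spec_source_paragraph_lines_py source_text out) := by unfold Spec_source_paragraph_lines_py; infer_instance

-- ===== CLAIM (what is proved, stated in full; the proofs are below) =====
def Claim_equal_source_paragraph_lines_py : Prop := ∀ (source_text : String), Dom_source_paragraph_lines_py source_text → Spec_source_paragraph_lines_py source_text (source_paragraph_lines_py source_text)

-- ===== LEMMAS AND PROOFS =====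

-- classification as a structural recursion (proof-side view of both loops)
def pvClassifyR (in_code : Bool) : List String → List (Bool × String)
  | [] => []
  | l :: r =>
      let (ic, blk, stripped) := pvClassifyLine in_code l
      (blk, stripped) :: pvClassifyR ic r

-- A's grouping, as a recursion over marks carrying the open paragraph
def pvGroupsAux (cur : List String) : List (Bool × String) → List (List String)
  | [] => if cur.isEmpty then [] else [cur]
  | (blk, s) :: r =>
      if blk then (if cur.isEmpty then [] else [cur]) ++ pvGroupsAux [] r
      else pvGroupsAux (cur ++ [s]) r

lemma pvMarks_foldl (ls : List String) (acc : List (Bool × String)) (ic : Bool) :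
    (ls.foldl (fun (st : List (Bool × String) × Bool) line =>
        let (ic', blk, stripped) := pvClassifyLine st.2 line
        (st.1 ++ [(blk, stripped)], ic')) (acc, ic)).1
      = acc ++ pvClassifyR ic ls := by
  induction ls generalizing acc ic with
  | nil => simp [pvClassifyR]
  | cons l r ih =>
      simp only [List.foldl_cons, pvClassifyR]
      rw [ih]
      simp

lemma pvA_foldl (ls : List String) (paras : List (List String)) (cur : List String) (ic : Bool) :
    (let st := ls.foldl
        (fun (st : List (List String) × List String × Bool) line =>
          let (paragraphs, current, in_code) := st
          let (ic', blk, stripped) := pvClassifyLine in_code line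
          if blk then
            (if current.isEmpty then paragraphs else paragraphs ++ [current], [], ic')
          else
            (paragraphs, current ++ [stripped], ic'))
        (paras, cur, ic)
      if st.2.1.isEmpty then st.1 else st.1 ++ [st.2.1])
      = paras ++ pvGroupsAux cur (pvClassifyR ic ls) := by
  induction ls generalizing paras cur ic with
  | nil =>
      simp only [List.foldl_nil, pvClassifyR, pvGroupsAux]
      split <;> simp_all
  | cons l r ih =>
      simp only [List.foldl_cons, pvClassifyR, pvGroupsAux]
      obtain ⟨ic', blk, stripped⟩ := pvClassifyLine ic l
      by_cases hb : blk <;> simp only [hb, if_true, if_false, Bool.false_eq_true]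
      · rw [ih]
        by_cases hc : cur.isEmpty <;> simp_all [pvGroupsAux]
      · rw [ih]

lemma pvGroupsAux_eq (marks : List (Bool × String)) :
    (pvGroupsAux [] marks = pvGroups marks) ∧
    (∀ cur : List String, ¬ cur.isEmpty →
      pvGroupsAux cur marks
        = (cur ++ (marks.takeWhile (fun m => !m.1)).map Prod.snd)
            :: pvGroups (marks.dropWhile (fun m => !m.1))) := by
  induction marks with
  | nil =>
      constructor
      · simp [pvGroupsAux, pvGroups]
      · intro cur hc
        simp_all [pvGroupsAux, pvGroups]
  | cons m r ih =>
      obtain ⟨b, s⟩ := m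
      constructor
      · cases b with
        | true => simpa [pvGroupsAux, pvGroups] using ih.1
        | false =>
            have h := ih.2 [s] (by simp)
            simpa [pvGroupsAux, pvGroups] using h
      · intro cur hc
        cases b with
        | true =>
            simp [pvGroupsAux, pvGroups, List.takeWhile, List.dropWhile, hc, ih.1]
        | false =>
            have h := ih.2 (cur ++ [s]) (by simp)
            simp [pvGroupsAux, List.takeWhile, List.dropWhile, h]

-- ===== VERDICT (by name: the statement is the Claim_ definition above) =====
set_option maxHeartbeats 1000000 in
theorem source_paragraph_lines_py_spec : Claim_equal_source_paragraph_lines_py := by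
  intro source_text _
  show source_paragraph_lines_py source_text = source_paragraph_lines_py_alt source_text
  unfold source_paragraph_lines_py source_paragraph_lines_py_alt pvMarks
  rw [pvMarks_foldl]
  refine (pvA_foldl (PySem.Str.splitlines (pvStripFrontmatter source_text)) [] [] false).trans ?_
  simp [(pvGroupsAux_eq _).1]
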